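-- pv_equiv track=rewrite | github.com/WTFPUn/moomsaparnloi.projekt | weighttest.py | cornerInshape
-- ===== SOURCE A (Python) =====
-- def cornerInshape(box, motorbikePOS):
--   corner = {
--     "upLeft" : (box[0], box[1]),
--     "upRight" : (box[0] + box[2], box[1]),
--     "downLeft" : (box[0], box[1] + box[3]),
--     "downRight" : (box[0] + box[2], box[1] + box[3])
--   }
--   checkpos = []
--   for i in corner:
--       checkpos.append(True if all([corner[i][0] in range(motorbikePOS[0], motorbikePOS[0] + motorbikePOS[2]), corner[i][1] in range(motorbikePOS[1], motorbikePOS[1] + motorbikePOS[3])]) else False)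
--   return any(checkpos)
-- ===== SOURCE B (Python) =====
-- def cornerInshape(box, motorbikePOS):
--     # The four corners are the Cartesian product {xL,xR} x {yT,yB}, so some
--     # corner is inside iff some x-value is in the x-range and some y-value
--     # is in the y-range.
--     xL, yT = box[0], box[1]
--     xR, yB = box[0] + box[2], box[1] + box[3]
--     x0, x1 = motorbikePOS[0], motorbikePOS[0] + motorbikePOS[2]
--     y0, y1 = motorbikePOS[1], motorbikePOS[1] + motorbikePOS[3]
--     return (xL in range(x0, x1) or xR in range(x0, x1)) and \
--            (yT in range(y0, y1) or yB in range(y0, y1))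
-- ===== Notes on version B (the rewrite author's own statement) =====
-- stated objective: simpler
-- what changed: Instead of materialising a dict of four corners, a list of per-corner booleans and any(), B factorises the Cartesian-product structure of the corners into one x-range test and one y-range test combined with or/and.
import Mathlib
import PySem

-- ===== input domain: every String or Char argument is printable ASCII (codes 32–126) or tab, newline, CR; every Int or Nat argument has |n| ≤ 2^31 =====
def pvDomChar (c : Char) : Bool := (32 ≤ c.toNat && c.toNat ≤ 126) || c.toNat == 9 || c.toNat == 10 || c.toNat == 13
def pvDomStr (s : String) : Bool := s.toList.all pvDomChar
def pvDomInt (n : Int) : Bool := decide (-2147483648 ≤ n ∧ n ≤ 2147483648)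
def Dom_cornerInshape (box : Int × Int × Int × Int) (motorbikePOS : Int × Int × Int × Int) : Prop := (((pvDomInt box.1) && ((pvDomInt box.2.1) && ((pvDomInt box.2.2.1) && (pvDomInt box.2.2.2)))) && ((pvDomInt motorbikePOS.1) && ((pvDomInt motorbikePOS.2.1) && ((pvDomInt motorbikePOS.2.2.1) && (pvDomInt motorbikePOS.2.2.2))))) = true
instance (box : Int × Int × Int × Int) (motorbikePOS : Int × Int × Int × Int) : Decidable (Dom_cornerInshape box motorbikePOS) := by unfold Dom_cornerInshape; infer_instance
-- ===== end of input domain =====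

-- B replaces the dict-of-corners + per-corner boolean list + any() with one x-range
-- test and one y-range test, exploiting that the corners are a Cartesian product (simpler).


-- ===== PORT A =====
-- 'v in range(a, b)' for an Int v is exactly a ≤ v < b
def pyInRange (v a b : Int) : Bool := decide (a ≤ v) && decide (v < b)

def cornerInshape (box : Int × Int × Int × Int) (motorbikePOS : Int × Int × Int × Int) : Bool :=
  let corner : List (String × (Int × Int)) :=
    [("upLeft", (box.1, box.2.1)),
     ("upRight", (box.1 + box.2.2.1, box.2.1)),
     ("downLeft", (box.1, box.2.1 + box.2.2.2)),
     ("downRight", (box.1 + box.2.2.1, box.2.1 + box.2.2.2))]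
  let checkpos : List Bool :=
    corner.foldl (fun acc i =>
      acc ++ [if ([pyInRange i.2.1 motorbikePOS.1 (motorbikePOS.1 + motorbikePOS.2.2.1),
                   pyInRange i.2.2 motorbikePOS.2.1 (motorbikePOS.2.1 + motorbikePOS.2.2.2)].all id)
              then true else false]) []
  checkpos.any id

-- ===== PORT B =====
def cornerInshape_alt (box : Int × Int × Int × Int) (motorbikePOS : Int × Int × Int × Int) : Bool :=
  let xL := box.1; let yT := box.2.1
  let xR := box.1 + box.2.2.1; let yB := box.2.1 + box.2.2.2
  let x0 := motorbikePOS.1; let x1 := motorbikePOS.1 + motorbikePOS.2.2.1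
  let y0 := motorbikePOS.2.1; let y1 := motorbikePOS.2.1 + motorbikePOS.2.2.2
  (pyInRange xL x0 x1 || pyInRange xR x0 x1) && (pyInRange yT y0 y1 || pyInRange yB y0 y1)

-- ===== PRECONDITION & SPEC =====
def Spec_cornerInshape (box : Int × Int × Int × Int) (motorbikePOS : Int × Int × Int × Int) (out : Bool) : Prop := out = cornerInshape_alt box motorbikePOS
instance (box : Int × Int × Int × Int) (motorbikePOS : Int × Int × Int × Int) (out : Bool) : Decidable (Spec_cornerInshape box motorbikePOS out) := by unfold Spec_cornerInshape; infer_instance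

-- ===== CLAIM (what is proved, stated in full; the proofs are below) =====
def Claim_equal_cornerInshape : Prop := ∀ (box : Int × Int × Int × Int) (motorbikePOS : Int × Int × Int × Int), Dom_cornerInshape box motorbikePOS → Spec_cornerInshape box motorbikePOS (cornerInshape box motorbikePOS)

-- ===== LEMMAS AND PROOFS =====
-- ===== VERDICT (by name: the statement is the Claim_ definition above) =====
theorem cornerInshape_spec : Claim_equal_cornerInshape := by
  intro box m _
  obtain ⟨bx, by', bw, bh⟩ := box
  obtain ⟨mx, my, mw, mh⟩ := m
  simp only [Spec_cornerInshape, cornerInshape, cornerInshape_alt, List.foldl, List.all,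
    List.any, id, Bool.and_true, List.nil_append]
  cases h1 : pyInRange bx mx (mx + mw) <;>
    cases h2 : pyInRange (bx + bw) mx (mx + mw) <;>
      cases h3 : pyInRange by' my (my + mh) <;>
        cases h4 : pyInRange (by' + bh) my (my + mh) <;>
          simp [h1, h2, h3, h4]
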